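-- pv_equiv track=rewrite | github.com/MrBrantCode/unitest_baseline | mut_generate/mist_train_cf/cf_49107/solution.py | find_last_prime_not_multiple_of_five
-- ===== SOURCE A (Python) =====
-- def find_last_prime_not_multiple_of_five(lst):
--     def is_prime(n):
--         if n <= 1 or (n % 2 == 0 and n > 2):
--             return False
--         for i in range(3, int(n**0.5) + 1, 2):
--             if n % i == 0:
--                 return False
--         return True
--
--     result = [x for x in lst if is_prime(x) and x % 5 != 0]
--     return result[-1] if result else None
-- ===== SOURCE B (Python) =====
-- def find_last_prime_not_multiple_of_five(lst):
--     def is_prime(n):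
--         if n <= 1 or (n % 2 == 0 and n > 2):
--             return False
--         for i in range(3, int(n**0.5) + 1, 2):
--             if n % i == 0:
--                 return False
--         return True
--
--     for x in reversed(lst):
--         if is_prime(x) and x % 5 != 0:
--             return x
--     return None
-- ===== Notes on version B (the rewrite author's own statement) =====
-- stated objective: faster
-- what changed: Instead of building the full list of matching primes and taking its last element, B scans the list in reverse and returns the first match immediately (early exit), keeping is_prime unchanged.
import Mathlib
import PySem

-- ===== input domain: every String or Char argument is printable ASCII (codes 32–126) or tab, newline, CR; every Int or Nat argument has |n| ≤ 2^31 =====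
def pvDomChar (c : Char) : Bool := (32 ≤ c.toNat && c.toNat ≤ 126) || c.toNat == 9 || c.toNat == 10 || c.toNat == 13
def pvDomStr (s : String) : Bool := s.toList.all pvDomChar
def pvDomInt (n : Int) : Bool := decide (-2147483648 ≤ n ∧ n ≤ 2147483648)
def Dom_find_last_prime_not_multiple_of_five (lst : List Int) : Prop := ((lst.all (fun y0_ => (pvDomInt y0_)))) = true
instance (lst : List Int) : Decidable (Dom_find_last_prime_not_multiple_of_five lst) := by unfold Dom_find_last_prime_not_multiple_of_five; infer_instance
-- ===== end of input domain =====

-- B scans the list in reverse and returns the first matching prime immediately, instead of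
-- A's full forward filter followed by taking the last element; return value proved equal on all inputs.


-- ===== PORT A =====
-- inner helper is_prime: identical in A and B (B keeps it verbatim), so one shared port.
-- int(n**0.5) is ported as Int.sqrt, exact for the |n| ≤ 2^31 domain (CPython's pow is
-- correctly rounded there, so truncation equals the integer square root).
def pyIsPrime (n : Int) : Bool :=
  if n ≤ 1 ∨ (n % 2 = 0 ∧ n > 2) then false
  else (PySem.List.pyRange 3 (Int.sqrt n + 1) 2).all (fun i => !(n % i == 0))

def find_last_prime_not_multiple_of_five (lst : List Int) : Option Int :=
  let result := lst.filter (fun x => pyIsPrime x && decide (x % 5 ≠ 0))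
  if result.isEmpty then none else PySem.List.pyGet? result (-1)

-- ===== PORT B =====
def pvFindFirst : List Int → Option Int
  | [] => none
  | x :: rest => if pyIsPrime x && decide (x % 5 ≠ 0) then some x else pvFindFirst rest

def find_last_prime_not_multiple_of_five_alt (lst : List Int) : Option Int :=
  pvFindFirst lst.reverse

-- ===== PRECONDITION & SPEC =====
def Spec_find_last_prime_not_multiple_of_five (lst : List Int) (out : Option Int) : Prop := out = find_last_prime_not_multiple_of_five_alt lst
instance (lst : List Int) (out : Option Int) : Decidable (Spec_find_last_prime_not_multiple_of_five lst out) := by unfold Spec_find_last_prime_not_multiple_of_five; infer_instance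

-- ===== CLAIM (what is proved, stated in full; the proofs are below) =====
def Claim_equal_find_last_prime_not_multiple_of_five : Prop := ∀ (lst : List Int), Dom_find_last_prime_not_multiple_of_five lst → Spec_find_last_prime_not_multiple_of_five lst (find_last_prime_not_multiple_of_five lst)

-- ===== LEMMAS AND PROOFS =====
theorem find?_eq_head?_filter (p : Int → Bool) (l : List Int) :
    l.find? p = (l.filter p).head? := by
  induction l with
  | nil => rfl
  | cons x rest ih =>
    rw [List.find?_cons, List.filter_cons]
    cases hx : p x <;>
      simp only [hx, ih, List.head?_cons, Bool.false_eq_true, if_false, if_true]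

theorem pvFindFirst_eq_find? (l : List Int) :
    pvFindFirst l = l.find? (fun x => pyIsPrime x && decide (x % 5 ≠ 0)) := by
  induction l with
  | nil => rfl
  | cons x rest ih =>
    rw [List.find?_cons]
    unfold pvFindFirst
    cases hx : (pyIsPrime x && decide (x % 5 ≠ 0)) <;>
      simp only [hx, Bool.false_eq_true, if_false, if_true, ih]

theorem alt_eq_getLast?_filter (lst : List Int) :
    find_last_prime_not_multiple_of_five_alt lst
      = (lst.filter (fun x => pyIsPrime x && decide (x % 5 ≠ 0))).getLast? := by
  unfold find_last_prime_not_multiple_of_five_alt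
  rw [pvFindFirst_eq_find?, find?_eq_head?_filter, List.filter_reverse, List.head?_reverse]

-- ===== VERDICT (by name: the statement is the Claim_ definition above) =====
theorem find_last_prime_not_multiple_of_five_spec : Claim_equal_find_last_prime_not_multiple_of_five := by
  intro lst _
  unfold Spec_find_last_prime_not_multiple_of_five find_last_prime_not_multiple_of_five
  rw [alt_eq_getLast?_filter]
  set r := lst.filter (fun x => pyIsPrime x && decide (x % 5 ≠ 0)) with hr
  by_cases h : r.isEmpty
  · simp [h, List.isEmpty_iff.mp h]
  · simp [h, PySem.List.pyGet?_neg_one]
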